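-- pv_equiv track=rewrite | github.com/aoshuangzhitou/daily_stock_analysis | src/agent/llm_adapter.py | _model_matches
-- ===== SOURCE A (Python) =====
-- from typing import Any, Dict, List, Optional
--
-- def _model_matches(model: str, entries: List[str]) -> bool:
--     """Check if model name matches any entry (exact or prefix with version suffix)."""
--     if not model:
--         return False
--     m = model.lower().strip()
--     for e in entries:
--         if m == e or m.startswith(e + "-"):
--             return True
--     return False
-- ===== SOURCE B (Python) =====
-- def _model_matches(model, entries):
--     """Check if model name matches any entry (exact or prefix with version suffix)."""
--     if not model:
--         return False
--     m = model.lower().strip()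
--     s = set(entries)
--     if m in s:
--         return True
--     for i in range(len(m)):
--         if m[i] == '-' and m[:i] in s:
--             return True
--     return False
-- ===== Notes on version B (the rewrite author's own statement) =====
-- stated objective: alternative
-- what changed: B builds a hash set of entries once and, instead of scanning the entries list testing equality/startswith per entry, checks m itself and each hyphen-delimited prefix of m for set membership; equivalent because m.startswith(e+'-') iff e equals m[:i] for some i with m[i]=='-'.
import Mathlib
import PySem

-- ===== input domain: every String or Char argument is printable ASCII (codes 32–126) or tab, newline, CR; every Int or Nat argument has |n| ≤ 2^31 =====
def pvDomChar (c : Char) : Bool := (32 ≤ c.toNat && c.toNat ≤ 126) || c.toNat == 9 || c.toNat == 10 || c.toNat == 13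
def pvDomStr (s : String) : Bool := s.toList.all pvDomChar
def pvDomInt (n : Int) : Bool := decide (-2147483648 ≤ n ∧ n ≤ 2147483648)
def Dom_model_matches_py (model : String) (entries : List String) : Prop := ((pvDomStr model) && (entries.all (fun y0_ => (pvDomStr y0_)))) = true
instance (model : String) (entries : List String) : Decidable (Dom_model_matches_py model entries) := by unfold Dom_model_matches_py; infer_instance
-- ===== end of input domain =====

-- ===== PORT A =====
-- B replaces the per-entry equality/startswith scan by one set of entries and a scan
-- over the hyphen positions of the model name (objective: alternative algorithm).
def model_matches_py (model : String) (entries : List String) : Bool :=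
  if model.toList == [] then false
  else
    let m := PySem.Chars.strip (PySem.Chars.lower model.toList)
    entries.any (fun e => m == e.toList || PySem.Chars.startswith m (e.toList ++ ['-']))

-- ===== PORT B =====
def model_matches_py_alt (model : String) (entries : List String) : Bool :=
  if model.toList == [] then false
  else
    let m := PySem.Chars.strip (PySem.Chars.lower model.toList)
    let s : PySem.Set (List Char) := PySem.Set.ofList (entries.map String.toList)
    if PySem.Set.contains s m then true
    else (List.range m.length).any (fun i => (m[i]? == some '-') && PySem.Set.contains s (m.take i))

-- ===== PRECONDITION & SPEC =====
def Spec_model_matches_py (model : String) (entries : List String) (out : Bool) : Prop := out = model_matches_py_alt model entries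
instance (model : String) (entries : List String) (out : Bool) : Decidable (Spec_model_matches_py model entries out) := by unfold Spec_model_matches_py; infer_instance

-- ===== CLAIM (what is proved, stated in full; the proofs are below) =====
def Claim_equal_model_matches_py : Prop := ∀ (model : String) (entries : List String), Dom_model_matches_py model entries → Spec_model_matches_py model entries (model_matches_py model entries)

-- ===== LEMMAS AND PROOFS =====

-- e + "-" is a prefix of m  iff  e is the prefix of m cut at some hyphen position.
lemma prefix_dash_iff (e m : List Char) :
    (e ++ ['-']) <+: m ↔ ∃ i, i < m.length ∧ m[i]? = some '-' ∧ m.take i = e := by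
  constructor
  · rintro ⟨t, ht⟩
    have ht' : m = e ++ '-' :: t := by rw [← ht]; simp
    subst ht'
    refine ⟨e.length, by simp, ?_, by simp⟩
    rw [List.getElem?_append_right (le_refl _)]
    simp
  · rintro ⟨i, hi, hget, htake⟩
    refine ⟨m.drop (i+1), ?_⟩
    have hdrop : m.drop i = m[i] :: m.drop (i+1) := List.drop_eq_getElem_cons hi
    have hch : m[i] = '-' := by
      have := List.getElem?_eq_getElem hi
      rw [this] at hget; exact Option.some.inj hget
    calc e ++ ['-'] ++ m.drop (i+1) = m.take i ++ ('-' :: m.drop (i+1)) := by simp [htake]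
    _ = m.take i ++ m.drop i := by rw [hdrop, hch]
    _ = m := List.take_append_drop i m

-- A's per-entry test succeeds for some entry  iff  one of B's membership tests succeeds.
lemma scan_eq_splitpoints (m : List Char) (L : List (List Char)) :
    (L.any (fun e => m == e || PySem.Chars.startswith m (e ++ ['-'])))
      = (decide (m ∈ L) || (List.range m.length).any
            (fun i => (m[i]? == some '-') && decide (m.take i ∈ L))) := by
  rw [Bool.eq_iff_iff]
  simp only [List.any_eq_true, Bool.or_eq_true, Bool.and_eq_true, beq_iff_eq,
    decide_eq_true_eq, List.mem_range]
  constructor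
  · rintro ⟨e, he, hme | hpre⟩
    · exact Or.inl (hme ▸ he)
    · rw [PySem.Chars.startswith_iff, prefix_dash_iff] at hpre
      obtain ⟨i, hi, hget, htake⟩ := hpre
      exact Or.inr ⟨i, hi, hget, htake ▸ he⟩
  · rintro (hm | ⟨i, hi, hget, hmem⟩)
    · exact ⟨m, hm, Or.inl rfl⟩
    · refine ⟨m.take i, hmem, Or.inr ?_⟩
      rw [PySem.Chars.startswith_iff, prefix_dash_iff]
      exact ⟨i, hi, hget, rfl⟩

-- the two nonempty-model bodies agree, for any m
lemma main_eq (m : List Char) (entries : List String) :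
    (entries.any (fun e => m == e.toList || PySem.Chars.startswith m (e.toList ++ ['-'])))
      = (if PySem.Set.contains (PySem.Set.ofList (entries.map String.toList)) m then true
         else (List.range m.length).any
            (fun i => (m[i]? == some '-') &&
              PySem.Set.contains (PySem.Set.ofList (entries.map String.toList)) (m.take i))) := by
  have hc : ∀ x : List Char,
      PySem.Set.contains (PySem.Set.ofList (entries.map String.toList)) x
        = decide (x ∈ entries.map String.toList) := by
    intro x
    rw [Bool.eq_iff_iff, PySem.Set.contains_iff, decide_eq_true_eq]
    exact PySem.Set.mem_ofList (y := x) (xs := entries.map String.toList)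
  have hA : (entries.any (fun e => m == e.toList || PySem.Chars.startswith m (e.toList ++ ['-'])))
      = ((entries.map String.toList).any
          (fun e => m == e || PySem.Chars.startswith m (e ++ ['-']))) := by
    simp [List.any_map, Function.comp_def]
  rw [hA, scan_eq_splitpoints]
  simp only [hc]
  cases hb : decide (m ∈ List.map String.toList entries) <;> simp only [Bool.false_eq_true, if_false, if_true, Bool.false_or, Bool.true_or]

-- ===== VERDICT (by name: the statement is the Claim_ definition above) =====
theorem model_matches_py_spec : Claim_equal_model_matches_py := by
  intro model entries _
  unfold Spec_model_matches_py model_matches_py model_matches_py_alt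
  by_cases h : model.toList = []
  · simp [h]
  · have h' : (model.toList == []) = false := by simpa using h
    simp only [h', Bool.false_eq_true, if_false]
    exact main_eq _ entries
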